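-- pv_equiv track=rewrite | github.com/SarahMLawrence/increasingSubstrings | main.py | increasingSubstrings
-- ===== SOURCE A (Python) =====
-- def increasingSubstrings(s):
--     letters = s[0]
--     output = []
--     for i in range(1, len(s)):
--         if ord(s[i]) - ord(s[i-1]) == 1:
--             letters += s[i]
--         else:
--             output.append(letters)
--             letters = s[i]
--     output.append(letters)
--     return output
-- ===== SOURCE B (Python) =====
-- def increasingSubstrings(s):
--     # cut-index decomposition: compute run boundaries, then slice s at them
--     cuts = [0]
--     for i in range(1, len(s)):
--         if ord(s[i]) - ord(s[i - 1]) != 1: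
--             cuts.append(i)
--     cuts.append(len(s))
--     return [s[a:b] for a, b in zip(cuts, cuts[1:])]
-- ===== Notes on version B (the rewrite author's own statement) =====
-- stated objective: alternative
-- what changed: B first computes the list of cut indices where the increasing run breaks and then slices the original string at those boundaries, instead of A's single pass that grows a current-run string character by character and flushes it into the output.
import Mathlib
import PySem

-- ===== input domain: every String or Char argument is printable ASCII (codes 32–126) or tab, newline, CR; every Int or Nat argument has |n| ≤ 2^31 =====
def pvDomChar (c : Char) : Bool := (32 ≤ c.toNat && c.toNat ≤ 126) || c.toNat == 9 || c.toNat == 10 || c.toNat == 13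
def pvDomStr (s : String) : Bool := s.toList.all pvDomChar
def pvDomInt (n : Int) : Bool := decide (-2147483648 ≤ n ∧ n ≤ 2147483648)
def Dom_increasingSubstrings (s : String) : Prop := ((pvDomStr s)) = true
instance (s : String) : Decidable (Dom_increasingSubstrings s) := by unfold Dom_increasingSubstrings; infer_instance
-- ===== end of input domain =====

-- B replaces A's single accumulate-and-flush pass by a cut-index decomposition
-- (collect run boundaries, then slice the string at them); objective: alternative, same cost.

-- ===== PORT A =====
-- A's loop: state (prev = s[i-1], letters = current run, output); branches in A's order.
def pvGoA (prev : Char) (letters : List Char) (output : List String) : List Char → List String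
  | [] => output ++ [String.ofList letters]
  | x :: xs =>
    if (x.toNat : Int) - (prev.toNat : Int) = 1 then
      pvGoA x (letters ++ [x]) output xs
    else
      pvGoA x [x] (output ++ [String.ofList letters]) xs

def increasingSubstrings (s : String) : List String :=
  match s.toList with
  | [] => []  -- Python A raises IndexError here (s[0] on ""); excluded by Pre_
  | c :: rest => pvGoA c [c] [] rest

-- ===== PORT B =====
-- the loop condition of Source B: ord(s[i]) - ord(s[i-1]) != 1 (i always in range, so getD is exact)
def pvCondB (l : List Char) (i : Nat) : Bool :=
  ! (((l.getD i ' ').toNat : Int) - ((l.getD (i - 1) ' ').toNat : Int) == 1)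

-- range(1, len(s)) = List.range' 1 (n-1); s[a:b] with 0 ≤ a ≤ b ≤ n is (drop a).take (b-a)
def increasingSubstrings_alt (s : String) : List String :=
  let l := s.toList
  let n := l.length
  let cuts : List Nat := 0 :: ((List.range' 1 (n - 1)).filter (pvCondB l) ++ [n])
  (cuts.zip cuts.tail).map (fun p => String.ofList ((l.drop p.1).take (p.2 - p.1)))

-- ===== PRECONDITION & SPEC =====
-- Pre_ excludes only the empty string, on which Python A raises IndexError (s[0]).
def Pre_increasingSubstrings (s : String) : Prop := s ≠ ""
instance (s : String) : Decidable (Pre_increasingSubstrings s) := by unfold Pre_increasingSubstrings; infer_instance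
def pvWitness_increasingSubstrings : String := "abcxyde"

def Spec_increasingSubstrings (s : String) (out : List String) : Prop := out = increasingSubstrings_alt s
instance (s : String) (out : List String) : Decidable (Spec_increasingSubstrings s out) := by unfold Spec_increasingSubstrings; infer_instance

-- ===== CLAIM (what is proved, stated in full; the proofs are below) =====
def Claim_equal_increasingSubstrings : Prop := ∀ (s : String), Dom_increasingSubstrings s → Pre_increasingSubstrings s → Spec_increasingSubstrings s (increasingSubstrings s)

-- ===== LEMMAS AND PROOFS =====

-- the canonical run decomposition both ports are proved equal to
def pvChunk : List Char → List (List Char)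
  | [] => []
  | [c] => [[c]]
  | c :: d :: t =>
    match pvChunk (d :: t) with
    | [] => [[c]]
    | r :: rs =>
      if (d.toNat : Int) - (c.toNat : Int) = 1 then (c :: r) :: rs else [c] :: r :: rs

theorem pvChunk_cons (d : Char) (t : List Char) :
    ∃ r rs, pvChunk (d :: t) = (d :: r) :: rs := by
  induction t generalizing d with
  | nil => exact ⟨[], [], rfl⟩
  | cons e t' ih =>
    obtain ⟨r, rs, hr⟩ := ih e
    by_cases h : (e.toNat : Int) - (d.toNat : Int) = 1
    · exact ⟨e :: r, rs, by simp [pvChunk, hr, h]⟩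
    · exact ⟨[], (e :: r) :: rs, by simp [pvChunk, hr, h]⟩

theorem pvGoA_eq (t : List Char) (prev : Char) (letters : List Char) (output : List String) :
    pvGoA prev letters output t =
      output ++ ((letters ++ ((pvChunk (prev :: t)).headI).tail) :: (pvChunk (prev :: t)).tail).map String.ofList := by
  induction t generalizing prev letters output with
  | nil => simp [pvGoA, pvChunk]
  | cons x xs ih =>
    obtain ⟨r, rs, hr⟩ := pvChunk_cons x xs
    by_cases h : (x.toNat : Int) - (prev.toNat : Int) = 1
    · rw [show pvGoA prev letters output (x :: xs) = pvGoA x (letters ++ [x]) output xs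
        from by simp [pvGoA, h]]
      rw [ih]
      simp [pvChunk, hr, h]
    · rw [show pvGoA prev letters output (x :: xs) = pvGoA x [x] (output ++ [String.ofList letters]) xs
        from by simp [pvGoA, h]]
      rw [ih]
      simp [pvChunk, hr, h]

theorem portA_eq (s : String) (c : Char) (rest : List Char) (hl : s.toList = c :: rest) :
    increasingSubstrings s = (pvChunk (c :: rest)).map String.ofList := by
  obtain ⟨r, rs, hr⟩ := pvChunk_cons c rest
  simp only [increasingSubstrings, hl]
  rw [pvGoA_eq, hr]
  simp

-- slice list at consecutive cut pairs (proof-side form of B's zip/slice comprehension)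
def pvSl (l : List Char) : List Nat → List (List Char)
  | a :: b :: rest => ((l.drop a).take (b - a)) :: pvSl l (b :: rest)
  | _ => []

def pvBs (l : List Char) : List Nat := (List.range' 1 (l.length - 1)).filter (pvCondB l)

theorem pvZipSl (l : List Char) (cuts : List Nat) :
    (cuts.zip cuts.tail).map (fun p => String.ofList ((l.drop p.1).take (p.2 - p.1)))
      = (pvSl l cuts).map String.ofList := by
  induction cuts with
  | nil => rfl
  | cons a rest ih =>
    cases rest with
    | nil => rfl
    | cons b rest' =>
      simp only [pvSl, List.tail_cons, List.zip_cons_cons, List.map_cons]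
      rw [← ih]
      rfl

theorem portB_eq (s : String) :
    increasingSubstrings_alt s
      = (pvSl s.toList (0 :: (pvBs s.toList ++ [s.toList.length]))).map String.ofList := by
  rw [increasingSubstrings_alt, pvBs]
  exact pvZipSl _ _

theorem range'_shift (s n : Nat) : List.range' (s + 1) n = (List.range' s n).map (· + 1) := by
  induction n generalizing s with
  | zero => rfl
  | succ n ih => simp [List.range'_succ, ih]

theorem pvBs_cons (c d : Char) (t : List Char) :
    pvBs (c :: d :: t)
      = (if pvCondB (c :: d :: t) 1 then [1] else []) ++ (pvBs (d :: t)).map (· + 1) := by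
  have hlen : (c :: d :: t).length - 1 = t.length + 1 := by simp
  have hr : List.range' 1 (t.length + 1) = 1 :: (List.range' 1 t.length).map (· + 1) := by
    rw [List.range'_succ, range'_shift]
  rw [pvBs, hlen, hr]
  rw [List.filter_cons]
  have hmap : ((List.range' 1 t.length).map (· + 1)).filter (pvCondB (c :: d :: t))
      = ((List.range' 1 t.length).filter (pvCondB (d :: t))).map (· + 1) := by
    rw [List.filter_map]
    congr 1
    apply List.filter_congr
    intro i hi
    have h1 : 1 ≤ i := (List.mem_range'_1.mp hi).1
    obtain ⟨j, rfl⟩ : ∃ j, i = j + 1 := ⟨i - 1, by omega⟩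
    simp only [Function.comp_apply, pvCondB]
    have : (c :: d :: t).getD (j + 1 + 1) ' ' = (d :: t).getD (j + 1) ' ' := by simp
    have h2 : (c :: d :: t).getD (j + 1 + 1 - 1) ' ' = (d :: t).getD (j + 1 - 1) ' ' := by
      simp [List.getD]
    rw [this, h2]
  rw [hmap]
  have hbs : pvBs (d :: t) = (List.range' 1 t.length).filter (pvCondB (d :: t)) := by
    rw [pvBs]; simp
  rw [hbs]
  split <;> simp

theorem pvSl_shift (cuts : List Nat) (c : Char) (l : List Char) :
    pvSl (c :: l) (cuts.map (· + 1)) = pvSl l cuts := by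
  induction cuts with
  | nil => rfl
  | cons a rest ih =>
    cases rest with
    | nil => rfl
    | cons b rest' =>
      simp only [List.map_cons] at ih ⊢
      rw [pvSl, pvSl, ih]
      congr 1
      simp [List.drop_succ_cons]

theorem pvSl_chunk (l : List Char) (hne : l ≠ []) :
    pvSl l (0 :: (pvBs l ++ [l.length])) = pvChunk l := by
  induction l with
  | nil => exact absurd rfl hne
  | cons c m ih =>
    cases m with
    | nil => simp [pvBs, pvSl, pvChunk]
    | cons d t =>
      have ihm := ih (by simp)
      obtain ⟨r, rs, hr⟩ := pvChunk_cons d t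
      obtain ⟨b, rest, hbr⟩ : ∃ b rest, pvBs (d :: t) ++ [(d :: t).length] = b :: rest := by
        cases h : pvBs (d :: t) ++ [(d :: t).length] with
        | nil => exact absurd h (by simp)
        | cons b rest => exact ⟨b, rest, rfl⟩
      rw [pvBs_cons]
      by_cases hdiff : (d.toNat : Int) - (c.toNat : Int) = 1
      · have hcond : pvCondB (c :: d :: t) 1 = false := by simp [pvCondB, hdiff]
        rw [hcond]
        have hcuts : (if (false : Bool) = true then [1] else ([] : List Nat))
              ++ (pvBs (d :: t)).map (· + 1) ++ [(c :: d :: t).length]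
            = (b :: rest).map (· + 1) := by
          rw [← hbr]; simp
        rw [hcuts]
        rw [hbr, hr] at ihm
        rw [pvSl] at ihm
        simp only [List.drop_zero, Nat.sub_zero] at ihm
        obtain ⟨htake, htail⟩ := List.cons_eq_cons.mp ihm
        rw [List.map_cons, pvSl]
        have h2 : pvSl (c :: d :: t) ((b + 1) :: rest.map (· + 1)) = pvSl (d :: t) (b :: rest) := by
          have h3 := pvSl_shift (b :: rest) c (d :: t)
          simpa using h3
        rw [h2, htail]
        have hch : pvChunk (c :: d :: t) = (c :: d :: r) :: rs := by
          simp [pvChunk, hr, hdiff]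
        rw [hch]
        simp only [List.drop_zero, Nat.sub_zero, List.take_succ_cons, htake]
      · have hcond : pvCondB (c :: d :: t) 1 = true := by simp [pvCondB, hdiff]
        rw [hcond]
        have hcuts : (if (true : Bool) = true then [1] else ([] : List Nat))
              ++ (pvBs (d :: t)).map (· + 1) ++ [(c :: d :: t).length]
            = 1 :: ((pvBs (d :: t)) ++ [(d :: t).length]).map (· + 1) := by
          simp
        rw [hcuts, pvSl]
        have h2 : pvSl (c :: d :: t) (1 :: ((pvBs (d :: t) ++ [(d :: t).length]).map (· + 1)))
            = pvSl (d :: t) (0 :: (pvBs (d :: t) ++ [(d :: t).length])) := by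
          have h3 := pvSl_shift (0 :: (pvBs (d :: t) ++ [(d :: t).length])) c (d :: t)
          simpa using h3
        rw [h2, ihm]
        have hch : pvChunk (c :: d :: t) = [c] :: (d :: r) :: rs := by
          simp [pvChunk, hr, hdiff]
        rw [hch, hr]
        simp

-- ===== VERDICT (by name: the statement is the Claim_ definition above) =====
theorem increasingSubstrings_spec : Claim_equal_increasingSubstrings := by
  intro s _ hpre
  unfold Spec_increasingSubstrings
  cases hl : s.toList with
  | nil =>
    exact absurd (by simpa using congrArg String.ofList hl) hpre
  | cons c rest =>
    rw [portA_eq s c rest hl, portB_eq, hl]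
    rw [pvSl_chunk _ (by simp)]
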